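-- pv_equiv track=rewrite | github.com/GP-data-engineer/Introduction-to-Algorithms-clrs-exercises | tests/Chapter09/test_exercise_9_3_8.py | compute_k_quantiles
-- ===== SOURCE A (Python) =====
-- def compute_k_quantiles(A, k):
--     # Zwraca k−1 kwantyli dzielących zbiór na k części
--     A_sorted = sorted(A)
--     n = len(A)
--     quantiles = []
--     for i in range(1, k):
--         index = (i * n) // k
--         quantiles.append(A_sorted[index])
--     return quantiles
-- ===== SOURCE B (Python) =====
-- def _multiselect(xs, rs):
--     # quickselect-style multi-selection: returns [sorted(xs)[r] for r in rs]
--     # for a nondecreasing list of valid ranks rs, without sorting xs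
--     if not rs:
--         return []
--     p = xs[0]
--     lt = [x for x in xs if x < p]
--     nlt = len(lt)
--     c = xs.count(p)
--     left = [r for r in rs if r < nlt]
--     mid = [p for r in rs if nlt <= r < nlt + c]
--     right = [r - nlt - c for r in rs if r >= nlt + c]
--     gt = [x for x in xs if x > p]
--     return _multiselect(lt, left) + mid + _multiselect(gt, right)
--
--
-- def compute_k_quantiles(A, k):
--     n = len(A)
--     idxs = [(i * n) // k for i in range(1, k)]
--     return _multiselect(A, idxs)
-- ===== Notes on version B (the rewrite author's own statement) =====
-- stated objective: alternative
-- what changed: B replaces sort-then-index by a recursive quickselect-style multi-selection: it partitions the list around a pivot once and routes the nondecreasing quantile ranks to the matching sub-partitions, never sorting.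
import Mathlib
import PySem

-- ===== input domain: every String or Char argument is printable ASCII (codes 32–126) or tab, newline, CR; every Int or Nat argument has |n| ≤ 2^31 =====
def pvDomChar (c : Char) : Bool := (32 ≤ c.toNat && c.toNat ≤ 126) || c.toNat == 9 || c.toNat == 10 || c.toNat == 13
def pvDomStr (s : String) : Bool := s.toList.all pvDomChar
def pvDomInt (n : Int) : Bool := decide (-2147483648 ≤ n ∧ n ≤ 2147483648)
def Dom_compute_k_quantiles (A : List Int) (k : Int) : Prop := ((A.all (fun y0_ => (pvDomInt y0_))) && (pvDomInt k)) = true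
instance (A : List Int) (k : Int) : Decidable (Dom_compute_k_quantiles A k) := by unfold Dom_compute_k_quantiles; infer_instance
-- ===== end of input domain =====

-- B replaces sort-then-index by a quickselect-style multi-selection: partition once around a
-- pivot and split the (nondecreasing) rank list across the partition; return values are equal.

-- ===== PORT A =====
def compute_k_quantiles (A : List Int) (k : Int) : List Int :=
  let A_sorted := PySem.List.sorted A (fun x => x) false
  let n : Int := A.length
  (PySem.List.pyRange 1 k 1).foldl
    (fun quantiles i =>
      let index := PySem.Int.floordiv (i * n) k
      quantiles ++ [PySem.List.pyGetD A_sorted index 0]) []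

-- ===== PORT B =====
-- multi-selection: the values sorted(xs) would have at the (nondecreasing, in-range) ranks rs.
-- The '[], _ :: _' branch is where Python B raises IndexError (xs[0] on empty xs); outside Pre_.
def pvMultiselect : List Int → List Int → List Int
  | _, [] => []
  | [], _ :: _ => []
  | p :: t, r :: rs =>
      let xs := p :: t
      let lt := xs.filter (fun x => decide (x < p))
      let nlt : Int := lt.length
      let c : Int := xs.count p
      let rall := r :: rs
      let left := rall.filter (fun q => decide (q < nlt))
      let mid := (rall.filter (fun q => decide (nlt ≤ q ∧ q < nlt + c))).map (fun _ => p)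
      let right := (rall.filter (fun q => decide (nlt + c ≤ q))).map (fun q => q - nlt - c)
      let gt := xs.filter (fun x => decide (p < x))
      pvMultiselect lt left ++ mid ++ pvMultiselect gt right
termination_by xs rs => xs.length
decreasing_by
  · simp only [List.filter_cons, decide_eq_true_eq, lt_self_iff_false, if_false, List.length_cons]
    have := List.length_filter_le (fun x => decide (x < p)) t
    omega
  · simp only [List.filter_cons, decide_eq_true_eq, lt_self_iff_false, if_false, List.length_cons]
    have := List.length_filter_le (fun x => decide (p < x)) t
    omega

def compute_k_quantiles_alt (A : List Int) (k : Int) : List Int :=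
  let n : Int := A.length
  let idxs := (PySem.List.pyRange 1 k 1).map (fun i => PySem.Int.floordiv (i * n) k)
  pvMultiselect A idxs

-- ===== PRECONDITION & SPEC =====
-- Pre_ excludes only the inputs on which A raises IndexError: an empty A with k ≥ 2
-- (the quantile index 0 is then out of range); Python B raises IndexError there too.
def Pre_compute_k_quantiles (A : List Int) (k : Int) : Prop := A ≠ [] ∨ k ≤ 1
instance (A : List Int) (k : Int) : Decidable (Pre_compute_k_quantiles A k) := by unfold Pre_compute_k_quantiles; infer_instance

def pvWitness_compute_k_quantiles : List Int × Int := ([3, 1, 4, 1, 5, 9, 2, 6], 4)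

def Spec_compute_k_quantiles (A : List Int) (k : Int) (out : List Int) : Prop := out = compute_k_quantiles_alt A k
instance (A : List Int) (k : Int) (out : List Int) : Decidable (Spec_compute_k_quantiles A k out) := by unfold Spec_compute_k_quantiles; infer_instance

-- ===== CLAIM (what is proved, stated in full; the proofs are below) =====
def Claim_equal_compute_k_quantiles : Prop := ∀ (A : List Int) (k : Int), Dom_compute_k_quantiles A k → Pre_compute_k_quantiles A k → Spec_compute_k_quantiles A k (compute_k_quantiles A k)

-- ===== LEMMAS AND PROOFS =====

-- three-way partition of xs around p, as a permutation
lemma pv_perm_three (xs : List Int) (p : Int) :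
    (xs.filter (fun x => decide (x < p)) ++ List.replicate (xs.count p) p
      ++ xs.filter (fun x => decide (p < x))).Perm xs := by
  induction xs with
  | nil => simp
  | cons y t ih =>
    rcases lt_trichotomy y p with h | h | h
    · simpa [List.filter_cons, List.count_cons, h, h.ne, not_lt.mpr h.le] using ih.cons y
    · subst h
      simp only [List.filter_cons, List.count_cons_self, lt_self_iff_false, decide_false,
        Bool.false_eq_true, if_false, List.replicate_succ]
      have h1 : (t.filter (fun x => decide (x < y)) ++ y :: (List.replicate (t.count y) y
          ++ t.filter (fun x => decide (y < x)))).Perm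
          (y :: (t.filter (fun x => decide (x < y)) ++ (List.replicate (t.count y) y
          ++ t.filter (fun x => decide (y < x))))) := List.perm_middle
      have h2 := h1.trans ((by simpa [List.append_assoc] using ih :
        (t.filter (fun x => decide (x < y)) ++ (List.replicate (t.count y) y
          ++ t.filter (fun x => decide (y < x)))).Perm t).cons y)
      simpa [List.append_assoc] using h2
    · have hne : ¬ (y = p) := h.ne'
      simp only [List.filter_cons, List.count_cons, if_neg (not_lt.mpr h.le),
        decide_eq_true_eq, if_pos h]
      have h1 : ((t.filter (fun x => decide (x < p)) ++ List.replicate (t.count p) p)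
          ++ y :: t.filter (fun x => decide (p < x))).Perm
          (y :: ((t.filter (fun x => decide (x < p)) ++ List.replicate (t.count p) p)
          ++ t.filter (fun x => decide (p < x)))) := List.perm_middle
      simpa [List.append_assoc, hne] using h1.trans (ih.cons y)

-- sorted xs decomposes around any pivot p
lemma pv_sorted_decomp (xs : List Int) (p : Int) :
    PySem.List.sorted xs (fun x => x) false =
      PySem.List.sorted (xs.filter (fun x => decide (x < p))) (fun x => x) false
      ++ List.replicate (xs.count p) p
      ++ PySem.List.sorted (xs.filter (fun x => decide (p < x))) (fun x => x) false := by
  apply PySem.List.sorted_id_eq_of_perm_of_pairwise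
  · exact (((PySem.List.sorted_perm _ _ _).append (List.Perm.refl _)).append
      (PySem.List.sorted_perm _ _ _)).trans (pv_perm_three xs p)
  · rw [List.pairwise_append, List.pairwise_append]
    refine ⟨⟨?_, ?_, ?_⟩, ?_, ?_⟩
    · simpa using PySem.List.sorted_pairwise (xs.filter (fun x => decide (x < p))) (fun x => x)
    · exact List.pairwise_replicate.mpr (Or.inr (le_refl p))
    · intro a ha b hb
      have ha' : a < p := by simpa using (List.mem_filter.mp ((PySem.List.mem_sorted _ _ _ _).mp ha)).2
      have hb' : b = p := List.eq_of_mem_replicate hb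
      omega
    · simpa using PySem.List.sorted_pairwise (xs.filter (fun x => decide (p < x))) (fun x => x)
    · intro a ha b hb
      have hb' : p < b := by simpa using (List.mem_filter.mp ((PySem.List.mem_sorted _ _ _ _).mp hb)).2
      rcases List.mem_append.mp ha with h | h
      · have : a < p := by simpa using (List.mem_filter.mp ((PySem.List.mem_sorted _ _ _ _).mp h)).2
        omega
      · have : a = p := List.eq_of_mem_replicate h
        omega

-- total length of the three-way partition
lemma pv_len_three (xs : List Int) (p : Int) :
    (xs.filter (fun x => decide (x < p))).length + xs.count p
      + (xs.filter (fun x => decide (p < x))).length = xs.length := by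
  have := (pv_perm_three xs p).length_eq
  simp at this
  omega

-- a nondecreasing rank list splits, in order, at a ≤ b
lemma pv_split_ranks (rs : List Int) (a b : Int) (hab : a ≤ b)
    (hs : rs.Pairwise (· ≤ ·)) :
    rs = rs.filter (fun q => decide (q < a))
      ++ rs.filter (fun q => decide (a ≤ q ∧ q < b))
      ++ rs.filter (fun q => decide (b ≤ q)) := by
  induction rs with
  | nil => simp
  | cons h t ih =>
    have hh := List.pairwise_cons.mp hs
    have iht := ih hh.2
    by_cases hc1 : h < a
    · simp only [List.filter_cons, hc1, decide_true, if_true,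
        show ¬(a ≤ h ∧ h < b) by omega, show ¬(b ≤ h) by omega, decide_false,
        Bool.false_eq_true, if_false, List.cons_append]
      exact congrArg (h :: ·) iht
    · have h1 : t.filter (fun q => decide (q < a)) = [] := by
        rw [List.filter_eq_nil_iff]; intro q hq
        have hhq := hh.1 q hq
        simp only [decide_eq_true_eq]; omega
      by_cases hc2 : h < b
      · simp only [List.filter_cons, hc1, show (a ≤ h ∧ h < b) by omega,
          show ¬(b ≤ h) by omega, decide_false, decide_true, Bool.false_eq_true,
          if_false, if_true, h1, List.nil_append, List.cons_append]
        rw [h1] at iht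
        simpa using congrArg (h :: ·) (by simpa using iht)
      · have h2 : t.filter (fun q => decide (a ≤ q ∧ q < b)) = [] := by
          rw [List.filter_eq_nil_iff]; intro q hq
          have hhq := hh.1 q hq
          simp only [decide_eq_true_eq]; omega
        simp only [List.filter_cons, hc1, show ¬(a ≤ h ∧ h < b) by omega,
          show b ≤ h by omega, decide_false, decide_true, Bool.false_eq_true,
          if_false, if_true, h1, h2, List.nil_append]
        rw [h1, h2] at iht
        simpa using congrArg (h :: ·) (by simpa using iht)

-- unfolding of pvMultiselect on a nonempty pivot list and rank list
lemma pvMultiselect_cons (p : Int) (t : List Int) (r : Int) (rs : List Int) :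
    pvMultiselect (p::t) (r::rs) =
      pvMultiselect ((p::t).filter (fun x => decide (x < p)))
        ((r::rs).filter (fun q => decide (q < (((p::t).filter (fun x => decide (x < p))).length : Int))))
      ++ ((r::rs).filter (fun q => decide ((((p::t).filter (fun x => decide (x < p))).length : Int) ≤ q ∧ q < (((p::t).filter (fun x => decide (x < p))).length : Int) + (((p::t).count p : Nat) : Int)))).map (fun _ => p)
      ++ pvMultiselect ((p::t).filter (fun x => decide (p < x)))
        (((r::rs).filter (fun q => decide ((((p::t).filter (fun x => decide (x < p))).length : Int) + (((p::t).count p : Nat) : Int) ≤ q))).map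
          (fun q => q - (((p::t).filter (fun x => decide (x < p))).length : Int) - (((p::t).count p : Nat) : Int))) := by
  rw [pvMultiselect]

-- the crux: multi-selection computes sorted-then-index
lemma pv_multiselect_eq_aux : ∀ (n : Nat) (xs rs : List Int), xs.length = n →
    (∀ r ∈ rs, 0 ≤ r ∧ r < (xs.length : Int)) → rs.Pairwise (· ≤ ·) →
    pvMultiselect xs rs
      = rs.map (fun r => PySem.List.pyGetD (PySem.List.sorted xs (fun x => x) false) r 0) := by
  intro n
  induction n using Nat.strong_induction_on with
  | _ n ih =>
    intro xs rs hn hb hs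
    match xs, rs with
    | xs, [] => cases xs <;> simp [pvMultiselect]
    | [], r :: rs' =>
      have h := hb r (by simp)
      exact absurd h.2 (by simpa using not_lt.mpr h.1)
    | p :: t, r :: rs' =>
      rw [pvMultiselect_cons]
      set xs := p :: t with hxs
      set L := xs.filter (fun x => decide (x < p)) with hL
      set G := xs.filter (fun x => decide (p < x)) with hG
      set cnt := xs.count p with hcnt
      set a : Int := (L.length : Int) with ha
      set b : Int := a + (cnt : Int) with hbdef
      set rall := r :: rs' with hrall
      have hlen3 := pv_len_three xs p
      have hdec := pv_sorted_decomp xs p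
      have hab : a ≤ b := by rw [hbdef]; exact le_add_of_nonneg_right (by positivity)
      have hsplit := pv_split_ranks rall a b hab hs
      set F1 := rall.filter (fun q => decide (q < a)) with hF1
      set F2 := rall.filter (fun q => decide (a ≤ q ∧ q < b)) with hF2
      set F3 := rall.filter (fun q => decide (b ≤ q)) with hF3
      have hn' : t.length + 1 = n := by simpa [hxs] using hn
      have hLlt : L.length < n := by
        have h := List.length_filter_le (fun x => decide (x < p)) t
        have : L.length ≤ t.length := by
          rw [hL, hxs]; simpa [List.filter_cons] using h
        omega
      have hGlt : G.length < n := by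
        have h := List.length_filter_le (fun x => decide (p < x)) t
        have : G.length ≤ t.length := by
          rw [hG, hxs]; simpa [List.filter_cons] using h
        omega
      have h1 : pvMultiselect L F1
          = F1.map (fun q => PySem.List.pyGetD (PySem.List.sorted L (fun x => x) false) q 0) := by
        refine ih L.length hLlt L F1 rfl ?_ ?_
        · intro q hq
          have hmem := List.mem_filter.mp hq
          have := hb q hmem.1
          have hqa : q < a := by simpa using hmem.2
          exact ⟨this.1, by rw [ha] at hqa; exact_mod_cast hqa⟩
        · exact hs.filter _
      have h3 : pvMultiselect G (F3.map (fun q => q - a - (cnt : Int)))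
          = (F3.map (fun q => q - a - (cnt : Int))).map
              (fun q => PySem.List.pyGetD (PySem.List.sorted G (fun x => x) false) q 0) := by
        refine ih G.length hGlt G _ rfl ?_ ?_
        · intro q hq
          obtain ⟨q0, hq0, rfl⟩ := List.mem_map.mp hq
          have hmem := List.mem_filter.mp hq0
          have hbq : b ≤ q0 := by simpa using hmem.2
          have hbb := hb q0 hmem.1
          constructor
          · omega
          · have : q0 < (xs.length : Int) := hbb.2
            rw [show (xs.length : Int) = a + (cnt : Int) + (G.length : Int) by
              rw [ha]; push_cast [← hlen3]; ring] at this
            omega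
        · rw [List.pairwise_map]
          exact (hs.filter _).imp (by intro x y h; omega)
      have hLs : (PySem.List.sorted L (fun x => x) false).length = L.length :=
        PySem.List.length_sorted _ _ _
      have hGs : (PySem.List.sorted G (fun x => x) false).length = G.length :=
        PySem.List.length_sorted _ _ _
      have hdec' : PySem.List.sorted xs (fun x => x) false
          = PySem.List.sorted L (fun x => x) false
            ++ (List.replicate cnt p ++ PySem.List.sorted G (fun x => x) false) := by
        rw [hdec, List.append_assoc]
      have e1 : ∀ q ∈ F1,
          PySem.List.pyGetD (PySem.List.sorted L (fun x => x) false) q 0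
            = PySem.List.pyGetD (PySem.List.sorted xs (fun x => x) false) q 0 := by
        intro q hq
        have hmem := List.mem_filter.mp hq
        have h0 := (hb q hmem.1).1
        have hqa : q < a := by simpa using hmem.2
        have hqn : q.toNat < L.length := by omega
        have hc1 : q < ((PySem.List.sorted L (fun x => x) false).length : Int) := by
          rw [hLs]; exact_mod_cast hqa
        have hc2 : q < ((PySem.List.sorted xs (fun x => x) false).length : Int) := by
          rw [PySem.List.length_sorted]; exact (hb q hmem.1).2
        rw [hdec']
        rw [PySem.List.pyGetD_eq_getElem _ 0 h0 hc1]
        rw [PySem.List.pyGetD_eq_getElem _ 0 h0 (by rw [← hdec']; exact hc2)]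
        rw [List.getElem_append_left (by rw [hLs]; exact hqn)]
      have e2 : ∀ q ∈ F2,
          p = PySem.List.pyGetD (PySem.List.sorted xs (fun x => x) false) q 0 := by
        intro q hq
        have hmem := List.mem_filter.mp hq
        have hq2 : a ≤ q ∧ q < b := by simpa using hmem.2
        have h0 := (hb q hmem.1).1
        have hc2 : q < ((PySem.List.sorted xs (fun x => x) false).length : Int) := by
          rw [PySem.List.length_sorted]; exact (hb q hmem.1).2
        rw [hdec']
        rw [PySem.List.pyGetD_eq_getElem _ 0 h0 (by rw [← hdec']; exact hc2)]
        rw [List.getElem_append_right (by rw [hLs]; omega)]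
        rw [List.getElem_append_left (by simp [hLs]; omega)]
        simp
      have e3 : ∀ q ∈ F3,
          PySem.List.pyGetD (PySem.List.sorted G (fun x => x) false) (q - a - (cnt : Int)) 0
            = PySem.List.pyGetD (PySem.List.sorted xs (fun x => x) false) q 0 := by
        intro q hq
        have hmem := List.mem_filter.mp hq
        have hbq : b ≤ q := by simpa using hmem.2
        have hbb := hb q hmem.1
        have hxl : (xs.length : Int) = a + (cnt : Int) + (G.length : Int) := by
          rw [ha]; push_cast [← hlen3]; ring
        have hcg : q - a - (cnt : Int) < ((PySem.List.sorted G (fun x => x) false).length : Int) := by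
          rw [hGs]; omega
        have hc2 : q < ((PySem.List.sorted xs (fun x => x) false).length : Int) := by
          rw [PySem.List.length_sorted]; exact hbb.2
        rw [hdec']
        rw [PySem.List.pyGetD_eq_getElem _ 0 (by omega) hcg]
        rw [PySem.List.pyGetD_eq_getElem _ 0 hbb.1 (by rw [← hdec']; exact hc2)]
        rw [List.getElem_append_right (by rw [hLs]; omega)]
        rw [List.getElem_append_right (by simp [hLs]; omega)]
        congr 1
        simp only [List.length_replicate, hLs]
        omega
      calc pvMultiselect L F1
            ++ F2.map (fun _ => p)
            ++ pvMultiselect G (F3.map (fun q => q - a - (cnt : Int)))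
          = F1.map (fun q => PySem.List.pyGetD (PySem.List.sorted xs (fun x => x) false) q 0)
            ++ F2.map (fun q => PySem.List.pyGetD (PySem.List.sorted xs (fun x => x) false) q 0)
            ++ F3.map (fun q => PySem.List.pyGetD (PySem.List.sorted xs (fun x => x) false) q 0) := by
            rw [h1, h3, List.map_map]
            congr 1
            congr 1
            · exact List.map_congr_left e1
            · exact List.map_congr_left (fun q hq => e2 q hq)
            · exact List.map_congr_left (fun q hq => e3 q hq)
        _ = rall.map (fun q => PySem.List.pyGetD (PySem.List.sorted xs (fun x => x) false) q 0) := by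
            rw [← List.map_append, ← List.map_append, ← hsplit]

lemma pvMultiselect_nil_ranks (xs : List Int) : pvMultiselect xs [] = [] := by
  cases xs <;> simp [pvMultiselect]

lemma pv_final (A : List Int) (k : Int) (hpre : A ≠ [] ∨ k ≤ 1) :
    compute_k_quantiles A k = compute_k_quantiles_alt A k := by
  by_cases hk : 2 ≤ k
  · have h0k : (0:Int) < k := by omega
    have hA : A ≠ [] := by
      rcases hpre with h | h
      · exact h
      · omega
    have hn : (0:Int) < (A.length : Int) := by
      cases A with
      | nil => exact absurd rfl hA
      | cons x xs => simp
    have hbounds : ∀ r ∈ (PySem.List.pyRange 1 k 1).map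
        (fun i => PySem.Int.floordiv (i * (A.length : Int)) k), 0 ≤ r ∧ r < (A.length : Int) := by
      intro r hr
      obtain ⟨i, hi, rfl⟩ := List.mem_map.mp hr
      obtain ⟨hi1, hi2⟩ := PySem.List.mem_pyRange_one.mp hi
      rw [PySem.Int.floordiv_eq_ediv_of_pos h0k]
      constructor
      · exact Int.ediv_nonneg (by positivity) h0k.le
      · rw [Int.ediv_lt_iff_lt_mul h0k]
        have := mul_lt_mul_of_pos_right hi2 hn
        linarith [this]
    have hpair : ((PySem.List.pyRange 1 k 1).map
        (fun i => PySem.Int.floordiv (i * (A.length : Int)) k)).Pairwise (· ≤ ·) := by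
      rw [List.pairwise_map]
      refine (PySem.List.pairwise_lt_pyRange_one 1 k).imp ?_
      intro i j hij
      rw [PySem.Int.floordiv_eq_ediv_of_pos h0k, PySem.Int.floordiv_eq_ediv_of_pos h0k]
      exact Int.ediv_le_ediv h0k (mul_le_mul_of_nonneg_right hij.le hn.le)
    have hmain := pv_multiselect_eq_aux A.length A _ rfl hbounds hpair
    simp only [compute_k_quantiles, compute_k_quantiles_alt, hmain,
      PySem.List.foldl_append_singleton_eq_map, List.nil_append, List.map_map]
    rfl
  · have hnil : PySem.List.pyRange 1 k 1 = [] := PySem.List.pyRange_one_eq_nil (by omega)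
    simp only [compute_k_quantiles, compute_k_quantiles_alt, hnil, List.map_nil,
      List.foldl_nil, pvMultiselect_nil_ranks]

-- ===== VERDICT (by name: the statement is the Claim_ definition above) =====
theorem compute_k_quantiles_spec : Claim_equal_compute_k_quantiles := by
  intro A k _ hpre
  exact pv_final A k hpre
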